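-- pv_equiv track=rewrite | github.com/Ninecl/ImBridge | utils.py | get_rel_info
-- ===== SOURCE A (Python) =====
-- def get_rel_info(triplets):
--     dic = {}
--     for h, r, t in triplets:
--         if r not in dic:
--             dic[r] = [[h, t], ]
--         else:
--             dic[r].append([h, t])
--     return dic
-- ===== SOURCE B (Python) =====
-- def get_rel_info(triplets):
--     rels = list(dict.fromkeys(r for _, r, _ in triplets))
--     return {r: [[h, t] for h, r2, t in triplets if r2 == r] for r in rels}
-- ===== Notes on version B (the rewrite author's own statement) =====
-- stated objective: simpler
-- what changed: Replaces the single-pass dict bucketing (conditional create-or-append per triplet) by a two-phase comprehension: dedup the relations in first-occurrence order, then build each group's [h,t] list by filtering the whole input per relation.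
import Mathlib
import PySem

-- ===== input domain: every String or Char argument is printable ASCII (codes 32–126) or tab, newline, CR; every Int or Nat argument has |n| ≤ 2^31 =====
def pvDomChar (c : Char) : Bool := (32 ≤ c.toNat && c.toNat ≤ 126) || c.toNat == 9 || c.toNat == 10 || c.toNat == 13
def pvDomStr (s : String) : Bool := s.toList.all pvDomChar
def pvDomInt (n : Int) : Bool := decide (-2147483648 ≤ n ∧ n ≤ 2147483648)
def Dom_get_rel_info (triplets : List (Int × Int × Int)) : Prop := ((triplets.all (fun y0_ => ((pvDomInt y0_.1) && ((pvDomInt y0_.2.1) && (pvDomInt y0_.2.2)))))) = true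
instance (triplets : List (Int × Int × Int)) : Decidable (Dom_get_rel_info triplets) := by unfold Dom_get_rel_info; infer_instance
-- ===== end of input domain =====

-- B replaces A's single-pass dict bucketing by a dedup of the relations followed by a
-- per-relation filter comprehension (simpler/idiomatic; same return value).

-- ===== PORT A =====
def get_rel_info (triplets : List (Int × Int × Int)) : List (Int × List (List Int)) :=
  (triplets.foldl (fun dic x =>
      if dic.contains x.2.1 = false then dic.insert x.2.1 [[x.1, x.2.2]]
      else dic.modify x.2.1 [] (fun l => l ++ [[x.1, x.2.2]]))
    PySem.Dict.empty).items

-- ===== PORT B =====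
def get_rel_info_alt (triplets : List (Int × Int × Int)) : List (Int × List (List Int)) :=
  let rels := PySem.Set.ofList (triplets.map (fun x => x.2.1))
  rels.map (fun r => (r, (triplets.filter (fun x => x.2.1 == r)).map (fun x => [x.1, x.2.2])))

-- ===== PRECONDITION & SPEC =====
def Spec_get_rel_info (triplets : List (Int × Int × Int)) (out : List (Int × List (List Int))) : Prop := out = get_rel_info_alt triplets
instance (triplets : List (Int × Int × Int)) (out : List (Int × List (List Int))) : Decidable (Spec_get_rel_info triplets out) := by unfold Spec_get_rel_info; infer_instance

-- ===== CLAIM (what is proved, stated in full; the proofs are below) =====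
def Claim_equal_get_rel_info : Prop := ∀ (triplets : List (Int × Int × Int)), Dom_get_rel_info triplets → Spec_get_rel_info triplets (get_rel_info triplets)

-- ===== LEMMAS AND PROOFS =====

def pvDictA (triplets : List (Int × Int × Int)) : PySem.Dict Int (List (List Int)) :=
  triplets.foldl (fun dic x =>
      if dic.contains x.2.1 = false then dic.insert x.2.1 [[x.1, x.2.2]]
      else dic.modify x.2.1 [] (fun l => l ++ [[x.1, x.2.2]]))
    PySem.Dict.empty

lemma pvDictA_items (triplets : List (Int × Int × Int)) :
    (pvDictA triplets).items =
      (PySem.Set.ofList (triplets.map (fun x => x.2.1))).map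
        (fun r => (r, (triplets.filter (fun x => x.2.1 == r)).map (fun x => [x.1, x.2.2]))) := by
  induction triplets using List.reverseRecOn with
  | nil => rfl
  | append_singleton xs x ih =>
    obtain ⟨h, r, t⟩ := x
    have hfold : pvDictA (xs ++ [(h, r, t)]) =
        (if (pvDictA xs).contains r = false then (pvDictA xs).insert r [[h, t]]
         else (pvDictA xs).modify r [] (fun l => l ++ [[h, t]])) := by
      simp [pvDictA, List.foldl_append]
    have hkeys : (pvDictA xs).keys = PySem.Set.ofList (xs.map (fun x => x.2.1)) := by
      simp only [PySem.Dict.keys, ih, List.map_map]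
      exact List.map_id _
    have hnd : (pvDictA xs).keys.Nodup := by rw [hkeys]; exact PySem.Set.nodup_ofList _
    have hcont : (pvDictA xs).contains r
        = decide (r ∈ PySem.Set.ofList (xs.map (fun x => x.2.1))) := by
      rw [PySem.Dict.contains_eq_decide_mem_keys, hkeys]
    have hset : PySem.Set.ofList ((xs ++ [(h, r, t)]).map (fun x => x.2.1))
        = (PySem.Set.ofList (xs.map (fun x => x.2.1))).add r := by
      simp only [List.map_append, List.map_cons, List.map_nil]
      exact PySem.Set.ofList_append_singleton _ _
    by_cases hmem : r ∈ PySem.Set.ofList (xs.map (fun x => x.2.1))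
    · -- existing relation: modify branch
      have hgetD : (pvDictA xs).getD r [] =
          (xs.filter (fun x => x.2.1 == r)).map (fun x => [x.1, x.2.2]) := by
        apply PySem.Dict.getD_of_mem_items _ _ hnd
        rw [ih]
        exact List.mem_map.mpr ⟨r, hmem, rfl⟩
      rw [hfold, hcont]
      simp only [hmem, decide_true, PySem.Dict.modify, hgetD]
      rw [if_neg (by simp)]
      rw [PySem.Dict.items_insert_of_contains _ _ (by rw [hcont]; simp [hmem]), ih,
        hset, PySem.Set.add_eq_ite, if_pos hmem, List.map_map]
      apply List.map_congr_left
      intro r' hr'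
      by_cases hrr : r' = r
      · subst hrr; simp [List.filter_append]
      · simp [hrr, Ne.symm hrr, List.filter_append]
    · -- new relation: insert branch
      have hfil : xs.filter (fun x => x.2.1 == r) = [] := by
        rw [List.filter_eq_nil_iff]
        intro a ha hb
        exact hmem ((PySem.Set.mem_ofList _ _).mpr (List.mem_map.mpr ⟨a, ha, by simpa using hb⟩))
      rw [hfold, hcont]
      simp only [hmem, decide_false]
      simp only [if_true]
      rw [PySem.Dict.items_insert_of_not_contains _ _ (by rw [hcont]; simp [hmem]), ih,
        hset, PySem.Set.add_eq_ite, if_neg hmem, List.map_append]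
      congr 1
      · apply List.map_congr_left
        intro r' hr'
        have hrr : r' ≠ r := fun e => hmem (e ▸ hr')
        simp only [List.filter_append]
        simp [Ne.symm hrr]
      · simp [List.filter_append, hfil]

theorem get_rel_info_spec_aux (triplets : List (Int × Int × Int)) :
    get_rel_info triplets = get_rel_info_alt triplets := by
  simpa [get_rel_info, get_rel_info_alt, pvDictA] using pvDictA_items triplets

-- ===== VERDICT (by name: the statement is the Claim_ definition above) =====
theorem get_rel_info_spec : Claim_equal_get_rel_info := by
  intro triplets _
  exact get_rel_info_spec_aux triplets
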